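-- pv_equiv track=rewrite | github.com/pete-q/ECE285-Optimized-EV-Charging-Agent | scripts/run_benchmark_vary_dates.py | _aligned_dates
-- ===== SOURCE A (Python) =====
-- from typing import Dict, List, Optional, Set, Tuple
--
-- def _aligned_dates(rows: List[Dict], pipelines: List[str]) -> Set[str]:
--     dates_by_p: Dict[str, Set[str]] = {}
--     for r in rows:
--         dates_by_p.setdefault(r["pipeline"], set()).add(str(r["date"]))
--     if not pipelines:
--         return set()
--     common = set(dates_by_p.get(pipelines[0], set()))
--     for p in pipelines[1:]:
--         common &= dates_by_p.get(p, set())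
--     return common
-- ===== SOURCE B (Python) =====
-- from typing import Dict, List, Set
--
--
-- def _aligned_dates(rows: List[Dict], pipelines: List[str]) -> Set[str]:
--     if not pipelines:
--         return set()
--     pipes_by_date: Dict[str, Set[str]] = {}
--     for r in rows:
--         pipes_by_date.setdefault(str(r["date"]), set()).add(r["pipeline"])
--     return {
--         str(r["date"])
--         for r in rows
--         if r["pipeline"] == pipelines[0]
--         and all(p in pipes_by_date[str(r["date"])] for p in pipelines)
--     }
-- ===== Notes on version B (the rewrite author's own statement) =====
-- stated objective: idiomatic
-- what changed: Inverts the grouping: one dict maps each date to the set of pipelines containing it, and the answer is a single comprehension keeping dates of the first pipeline whose pipeline-set contains every requested pipeline, replacing A's per-pipeline sets and iterated set-intersection loop.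
import Mathlib
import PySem

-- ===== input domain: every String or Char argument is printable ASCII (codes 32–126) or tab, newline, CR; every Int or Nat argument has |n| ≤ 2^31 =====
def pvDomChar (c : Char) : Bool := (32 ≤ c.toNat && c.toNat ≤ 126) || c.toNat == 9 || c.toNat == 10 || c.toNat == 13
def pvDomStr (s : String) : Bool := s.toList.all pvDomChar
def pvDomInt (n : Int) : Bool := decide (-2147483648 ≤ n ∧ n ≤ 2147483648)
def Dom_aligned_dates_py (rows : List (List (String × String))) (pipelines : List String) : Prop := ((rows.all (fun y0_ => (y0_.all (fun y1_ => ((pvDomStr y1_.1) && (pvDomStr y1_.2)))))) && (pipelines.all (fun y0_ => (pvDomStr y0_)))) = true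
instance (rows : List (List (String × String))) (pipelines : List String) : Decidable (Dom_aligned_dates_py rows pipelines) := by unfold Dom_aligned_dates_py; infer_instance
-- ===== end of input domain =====

-- B inverts the grouping (a dict from each date to the set of pipelines holding it, then one
-- membership-checking comprehension) instead of A's per-pipeline date sets with an iterated
-- set-intersection loop; equal return value on every input where A returns (Pre_).


-- r[k] for a row dict, total form with default "" — used ONLY under Pre_ (key present)
def pvRowGet (r : List (String × String)) (k : String) : String :=
  (PySem.Dict.mk r).getD k ""

-- ===== PORT A =====
def aligned_dates_py (rows : List (List (String × String))) (pipelines : List String) : List String :=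
  -- dates_by_p: for r in rows: dates_by_p.setdefault(r["pipeline"], set()).add(str(r["date"]))
  let datesByP : PySem.Dict String (PySem.Set String) :=
    rows.foldl (fun d r =>
      d.modify (pvRowGet r "pipeline") PySem.Set.empty
        (fun s => PySem.Set.add s (pvRowGet r "date"))) PySem.Dict.empty
  match pipelines with
  | [] => []                                           -- if not pipelines: return set()
  | p0 :: rest =>
    -- common = set(dates_by_p.get(pipelines[0], set())); for p in pipelines[1:]: common &= …
    rest.foldl (fun common p => PySem.Set.inter common (datesByP.getD p PySem.Set.empty))
      (PySem.Set.ofList (datesByP.getD p0 PySem.Set.empty))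

-- ===== PORT B =====
def aligned_dates_py_alt (rows : List (List (String × String))) (pipelines : List String) : List String :=
  match pipelines with
  | [] => []                                           -- if not pipelines: return set()
  | p0 :: rest =>
    -- pipes_by_date: for r in rows: pipes_by_date.setdefault(str(r["date"]), set()).add(r["pipeline"])
    let pipesByDate : PySem.Dict String (PySem.Set String) :=
      rows.foldl (fun d r =>
        d.modify (pvRowGet r "date") PySem.Set.empty
          (fun s => PySem.Set.add s (pvRowGet r "pipeline"))) PySem.Dict.empty
    -- {str(r["date"]) for r in rows if r["pipeline"] == pipelines[0] and all(p in pipes_by_date[…])}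
    rows.foldl (fun acc r =>
      if pvRowGet r "pipeline" == p0 &&
         (p0 :: rest).all (fun p => (pipesByDate.getD (pvRowGet r "date") PySem.Set.empty).contains p)
      then PySem.Set.add acc (pvRowGet r "date") else acc) PySem.Set.empty

-- ===== PRECONDITION & SPEC =====
-- Pre_ excludes exactly the rows on which Python A raises KeyError: a row missing "pipeline" or "date".
def Pre_aligned_dates_py (rows : List (List (String × String))) (pipelines : List String) : Prop :=
  ∀ r ∈ rows, (PySem.Dict.mk r).contains "pipeline" = true ∧ (PySem.Dict.mk r).contains "date" = true
instance (rows : List (List (String × String))) (pipelines : List String) : Decidable (Pre_aligned_dates_py rows pipelines) := by unfold Pre_aligned_dates_py; infer_instance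

def pvWitness_aligned_dates_py : (List (List (String × String))) × List String :=
  ([[("pipeline", "p1"), ("date", "2024-01-01")], [("pipeline", "p2"), ("date", "2024-01-01")]], ["p1", "p2"])

def Spec_aligned_dates_py (rows : List (List (String × String))) (pipelines : List String) (out : List String) : Prop := out = aligned_dates_py_alt rows pipelines
instance (rows : List (List (String × String))) (pipelines : List String) (out : List String) : Decidable (Spec_aligned_dates_py rows pipelines out) := by unfold Spec_aligned_dates_py; infer_instance

-- ===== CLAIM (what is proved, stated in full; the proofs are below) =====
def Claim_equal_aligned_dates_py : Prop := ∀ (rows : List (List (String × String))) (pipelines : List String), Dom_aligned_dates_py rows pipelines → Pre_aligned_dates_py rows pipelines → Spec_aligned_dates_py rows pipelines (aligned_dates_py rows pipelines)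

-- ===== LEMMAS AND PROOFS =====

-- The grouping loop `for r: d.setdefault(key r, set()).add(val r)`, read back at one key k,
-- appends (in row order) the values of the rows keyed k.
theorem pv_groupGetD (rows : List (List (String × String)))
    (keyf valf : List (String × String) → String) (k : String) :
    ∀ d : PySem.Dict String (PySem.Set String),
      (rows.foldl (fun d r =>
          d.modify (keyf r) PySem.Set.empty (fun s => PySem.Set.add s (valf r))) d).getD k PySem.Set.empty
        = PySem.Set.update (d.getD k PySem.Set.empty) ((rows.filter (fun r => keyf r == k)).map valf) := by
  induction rows with
  | nil => intro d; simp [PySem.Set.update]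
  | cons r rows ih =>
    intro d
    simp only [List.foldl_cons, List.filter_cons]
    rw [ih, PySem.Dict.getD_modify]
    by_cases h : keyf r = k
    · simp [h, PySem.Set.update]
    · have h' : ¬ k = keyf r := fun h'' => h h''.symm
      simp [h', beq_eq_false_iff_ne.mpr h]

-- filter commutes with Set.add
theorem pv_filter_add (s : PySem.Set String) (x : String) (q : String → Bool) :
    (PySem.Set.add s x).filter q = if q x then PySem.Set.add (s.filter q) x else s.filter q := by
  by_cases hx : x ∈ s
  · have h1 : PySem.Set.add s x = s := by simp [PySem.Set.add, PySem.Set.contains, hx]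
    by_cases hq : q x = true
    · have hxf : x ∈ s.filter q := List.mem_filter.mpr ⟨hx, hq⟩
      have h2 : PySem.Set.add (s.filter q) x = s.filter q := by
        simp [PySem.Set.add, PySem.Set.contains, hxf]
      rw [h1, if_pos hq, h2]
    · rw [h1, if_neg hq]
  · have h1 : PySem.Set.add s x = s ++ [x] := by simp [PySem.Set.add, PySem.Set.contains, hx]
    by_cases hq : q x = true
    · have hxf : x ∉ s.filter q := fun h => hx (List.mem_filter.mp h).1
      have h2 : PySem.Set.add (s.filter q) x = s.filter q ++ [x] := by
        simp [PySem.Set.add, PySem.Set.contains, hxf]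
      rw [h1, if_pos hq, h2, List.filter_append]
      simp [hq]
    · rw [h1, if_neg hq, List.filter_append]
      simp [hq]

-- filter commutes with Set.update / Set.ofList
theorem pv_update_filter (l : List String) (q : String → Bool) :
    ∀ s : PySem.Set String,
      PySem.Set.update (s.filter q) (l.filter q) = (PySem.Set.update s l).filter q := by
  induction l with
  | nil => intro s; simp [PySem.Set.update]
  | cons x l ih =>
    intro s
    simp only [List.filter_cons]
    by_cases hq : q x = true
    · rw [if_pos hq]
      calc PySem.Set.update (s.filter q) (x :: l.filter q)
          = PySem.Set.update (PySem.Set.add (s.filter q) x) (l.filter q) := rfl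
        _ = PySem.Set.update ((PySem.Set.add s x).filter q) (l.filter q) := by
              rw [pv_filter_add, if_pos hq]
        _ = ((PySem.Set.update (PySem.Set.add s x) l)).filter q := ih _
        _ = (PySem.Set.update s (x :: l)).filter q := rfl
    · rw [if_neg hq]
      calc PySem.Set.update (s.filter q) (l.filter q)
          = PySem.Set.update ((PySem.Set.add s x).filter q) (l.filter q) := by
              rw [pv_filter_add, if_neg hq]
        _ = ((PySem.Set.update (PySem.Set.add s x) l)).filter q := ih _
        _ = (PySem.Set.update s (x :: l)).filter q := rfl

theorem pv_ofList_filter (l : List String) (q : String → Bool) :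
    PySem.Set.ofList (l.filter q) = (PySem.Set.ofList l).filter q := by
  have := pv_update_filter l q PySem.Set.empty
  simpa [PySem.Set.update, PySem.Set.ofList, PySem.Set.empty] using this

-- B's accumulation loop builds Set.update of the filtered, mapped rows
theorem pv_foldl_add_if (rows : List (List (String × String)))
    (c : List (String × String) → Bool) (v : List (String × String) → String) :
    ∀ s : PySem.Set String,
      rows.foldl (fun acc r => if c r then PySem.Set.add acc (v r) else acc) s
        = PySem.Set.update s ((rows.filter c).map v) := by
  induction rows with
  | nil => intro s; simp [PySem.Set.update]
  | cons r rows ih =>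
    intro s
    simp only [List.foldl_cons, List.filter_cons]
    by_cases h : c r = true
    · rw [if_pos h, if_pos h, ih]; rfl
    · rw [if_neg h, if_neg h, ih]

-- A's intersection loop is one filter by membership in every set
theorem pv_foldl_inter (ps : List String) (S : String → PySem.Set String) :
    ∀ base : PySem.Set String,
      ps.foldl (fun c p => PySem.Set.inter c (S p)) base
        = base.filter (fun d => ps.all (fun p => (S p).contains d)) := by
  induction ps with
  | nil => intro base; simp
  | cons p ps ih =>
    intro base
    rw [List.foldl_cons, ih, PySem.Set.inter, List.filter_filter]
    exact List.filter_congr (fun d _ => by simp [List.all_cons, Bool.and_comm])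

-- membership symmetry: d among pipeline-p dates ↔ p among date-d pipelines
theorem pv_contains_swap {α : Type} (rows : List α) (P Dt : α → String) (p d : String) :
    (PySem.Set.ofList ((rows.filter (fun r => P r == p)).map Dt)).contains d
      = (PySem.Set.ofList ((rows.filter (fun r => Dt r == d)).map P)).contains p := by
  rw [Bool.eq_iff_iff]
  simp only [PySem.Set.contains, List.contains_iff_mem, PySem.Set.mem_ofList, List.mem_map,
    List.mem_filter, beq_iff_eq]
  constructor
  · rintro ⟨r, ⟨hr, hp⟩, hd⟩; exact ⟨r, ⟨hr, hd⟩, hp⟩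
  · rintro ⟨r, ⟨hr, hd⟩, hp⟩; exact ⟨r, ⟨hr, hp⟩, hd⟩

-- the two deduplicated, filtered date lists coincide
theorem pv_final {α : Type} (rows : List α) (P Dt : α → String) (p0 : String) (rest : List String) :
    List.filter (fun d => rest.all (fun p =>
        (PySem.Set.ofList ((rows.filter (fun r => P r == p)).map Dt)).contains d))
      (PySem.Set.ofList ((rows.filter (fun r => P r == p0)).map Dt))
    = PySem.Set.ofList ((rows.filter (fun r => (P r == p0) &&
        (p0 :: rest).all (fun p =>
          (PySem.Set.ofList ((rows.filter (fun r' => Dt r' == Dt r)).map P)).contains p))).map Dt) := by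
  calc
    List.filter (fun d => rest.all (fun p =>
        (PySem.Set.ofList ((rows.filter (fun r => P r == p)).map Dt)).contains d))
      (PySem.Set.ofList ((rows.filter (fun r => P r == p0)).map Dt))
      = List.filter (fun d => (p0 :: rest).all (fun p =>
          (PySem.Set.ofList ((rows.filter (fun r' => Dt r' == d)).map P)).contains p))
        (PySem.Set.ofList ((rows.filter (fun r => P r == p0)).map Dt)) := by
          refine List.filter_congr ?_
          intro x hx
          obtain ⟨r, hr, hxd⟩ :=
            List.mem_map.mp ((PySem.Set.mem_ofList _ _).mp hx)
          obtain ⟨hrr, hrp⟩ := List.mem_filter.mp hr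
          have h1 : (PySem.Set.ofList ((rows.filter (fun r' => Dt r' == x)).map P)).contains p0
              = true := by
            rw [← pv_contains_swap rows P Dt p0 x]
            simp only [PySem.Set.contains, List.contains_iff_mem, PySem.Set.mem_ofList]
            exact List.mem_map.mpr ⟨r, List.mem_filter.mpr ⟨hrr, hrp⟩, hxd⟩
          rw [List.all_cons, h1, Bool.true_and]
          exact congrArg (List.all rest) (funext fun p => pv_contains_swap rows P Dt p x)
    _ = PySem.Set.ofList (List.filter (fun d => (p0 :: rest).all (fun p =>
          (PySem.Set.ofList ((rows.filter (fun r' => Dt r' == d)).map P)).contains p))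
        ((rows.filter (fun r => P r == p0)).map Dt)) := (pv_ofList_filter _ _).symm
    _ = PySem.Set.ofList ((List.filter (fun r => (p0 :: rest).all (fun p =>
          (PySem.Set.ofList ((rows.filter (fun r' => Dt r' == Dt r)).map P)).contains p))
        (rows.filter (fun r => P r == p0))).map Dt) :=
          congrArg PySem.Set.ofList List.filter_map
    _ = PySem.Set.ofList ((rows.filter (fun r => ((p0 :: rest).all (fun p =>
          (PySem.Set.ofList ((rows.filter (fun r' => Dt r' == Dt r)).map P)).contains p))
          && (P r == p0))).map Dt) := by rw [List.filter_filter]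
    _ = PySem.Set.ofList ((rows.filter (fun r => (P r == p0) &&
        (p0 :: rest).all (fun p =>
          (PySem.Set.ofList ((rows.filter (fun r' => Dt r' == Dt r)).map P)).contains p))).map Dt) :=
          congrArg PySem.Set.ofList
            (congrArg (List.map Dt) (List.filter_congr (fun r _ => Bool.and_comm _ _)))

-- ===== VERDICT (by name: the statement is the Claim_ definition above) =====
theorem aligned_dates_py_spec : Claim_equal_aligned_dates_py := by
  intro rows pipelines _ _
  show aligned_dates_py rows pipelines = aligned_dates_py_alt rows pipelines
  cases pipelines with
  | nil => rfl
  | cons p0 rest =>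
    show (rest.foldl _ _ : List String) = rows.foldl _ _
    rw [pv_foldl_inter, pv_foldl_add_if]
    simp only [pv_groupGetD, PySem.Dict.getD_empty]
    have hupd : ∀ l : List String, PySem.Set.update PySem.Set.empty l = PySem.Set.ofList l :=
      fun l => rfl
    simp only [hupd]
    rw [PySem.Set.ofList_eq_self_of_nodup _ (PySem.Set.nodup_ofList _)]
    exact pv_final rows (fun r => pvRowGet r "pipeline") (fun r => pvRowGet r "date") p0 rest
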